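-- pv_equiv track=rewrite | github.com/AmbassadeursCourageuxDeLaMontagePourpre/Catalyst2018 | src/lvl3/same_meteorite.py | same_meteroite
-- ===== SOURCE A (Python) =====
-- def same_meteroite(img):
--     # Parcourt de l'image
--     # Dès qu'on trouve le premier, point
--     # il devient la référence
--     # Ensuite on ajoute chaque point > 0
--     # relatif
--
--     ref_x = -1
--     ref_y = -1
--
--     new_shape = []
--
--     for i in range(len(img)):
--         for j in range(len(img[i])):
--
--             # Si on trouve un pixel
--             if img[i][j] > 0:
--
--                 # Le point de ref n'est pas fait
--                 if ref_x == -1: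
--                     ref_x = i
--                     ref_y = j
--
--                 # On l'ajoute au new_shape
--                 new_shape.append((ref_x-i, ref_y-j))
--
--     return new_shape
-- ===== SOURCE B (Python) =====
-- def same_meteroite(img):
--     # Phase 1: find the first positive pixel in row-major order (the reference).
--     ref = None
--     for i in range(len(img)):
--         for j in range(len(img[i])):
--             if img[i][j] > 0:
--                 ref = (i, j)
--                 break
--         if ref is not None:
--             break
--     if ref is None:
--         return []
--     rx, ry = ref
--     # Phase 2: collect offsets of every positive pixel relative to the reference.
--     return [(rx - i, ry - j) for i in range(len(img)) for j in range(len(img[i])) if img[i][j] > 0]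
-- ===== Notes on version B (the rewrite author's own statement) =====
-- stated objective: alternative
-- what changed: A threads mutable reference state (ref_x/ref_y sentinel -1) through a single combined pass; B decomposes into a reference-finding pass with early break followed by a stateless list comprehension collecting offsets.
import Mathlib
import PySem

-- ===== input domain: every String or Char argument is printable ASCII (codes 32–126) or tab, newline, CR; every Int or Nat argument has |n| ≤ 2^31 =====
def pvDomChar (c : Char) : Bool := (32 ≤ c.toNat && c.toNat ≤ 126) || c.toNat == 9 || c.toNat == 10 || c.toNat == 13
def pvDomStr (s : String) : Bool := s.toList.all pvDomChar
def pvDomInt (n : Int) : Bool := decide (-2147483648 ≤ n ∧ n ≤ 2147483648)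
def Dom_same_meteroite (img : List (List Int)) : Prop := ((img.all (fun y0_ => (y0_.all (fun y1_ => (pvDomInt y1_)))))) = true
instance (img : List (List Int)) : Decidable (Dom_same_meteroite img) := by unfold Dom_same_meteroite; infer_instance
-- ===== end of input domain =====

-- B decomposes A's single stateful pass into a reference-finding pass plus a stateless collecting pass; equal results, same cost.

-- ===== PORT A =====
-- inner `for j` loop: j is the running column index, st = (ref_x, ref_y, new_shape)
def pvLoopRow (r : List Int) (i j : Int) (st : Int × Int × List (Int × Int)) :
    Int × Int × List (Int × Int) :=
  match r with
  | [] => st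
  | x :: xs =>
      let st' :=
        if x > 0 then
          let rx := if st.1 = -1 then i else st.1
          let ry := if st.1 = -1 then j else st.2.1
          (rx, ry, st.2.2 ++ [(rx - i, ry - j)])
        else st
      pvLoopRow xs i (j + 1) st'

-- outer `for i` loop
def pvLoopRows (rows : List (List Int)) (i : Int) (st : Int × Int × List (Int × Int)) :
    Int × Int × List (Int × Int) :=
  match rows with
  | [] => st
  | r :: rs => pvLoopRows rs (i + 1) (pvLoopRow r i 0 st)

def same_meteroite (img : List (List Int)) : List (Int × Int) :=
  (pvLoopRows img 0 (-1, -1, [])).2.2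

-- ===== PORT B =====
-- phase 1: first positive pixel of one row / of the grid (early break)
def pvFindRow (r : List Int) (j : Int) : Option Int :=
  match r with
  | [] => none
  | x :: xs => if x > 0 then some j else pvFindRow xs (j + 1)

def pvFindRef (rows : List (List Int)) (i : Int) : Option (Int × Int) :=
  match rows with
  | [] => none
  | r :: rs =>
      match pvFindRow r 0 with
      | some j => some (i, j)
      | none => pvFindRef rs (i + 1)

-- phase 2: the comprehension, row by row / cell by cell
def pvCollectRow (r : List Int) (i j rx ry : Int) : List (Int × Int) :=
  match r with
  | [] => []
  | x :: xs => (if x > 0 then [(rx - i, ry - j)] else []) ++ pvCollectRow xs i (j + 1) rx ry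

def pvCollectRows (rows : List (List Int)) (i rx ry : Int) : List (Int × Int) :=
  match rows with
  | [] => []
  | r :: rs => pvCollectRow r i 0 rx ry ++ pvCollectRows rs (i + 1) rx ry

def same_meteroite_alt (img : List (List Int)) : List (Int × Int) :=
  match pvFindRef img 0 with
  | none => []
  | some (rx, ry) => pvCollectRows img 0 rx ry

-- ===== PRECONDITION & SPEC =====
def Spec_same_meteroite (img : List (List Int)) (out : List (Int × Int)) : Prop := out = same_meteroite_alt img
instance (img : List (List Int)) (out : List (Int × Int)) : Decidable (Spec_same_meteroite img out) := by unfold Spec_same_meteroite; infer_instance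

-- ===== CLAIM (what is proved, stated in full; the proofs are below) =====
def Claim_equal_same_meteroite : Prop := ∀ (img : List (List Int)), Dom_same_meteroite img → Spec_same_meteroite img (same_meteroite img)

-- ===== LEMMAS AND PROOFS =====

-- once the reference is set (rx ≥ 0, so never -1), A's inner loop just appends the row's offsets
theorem pvLoopRow_set (r : List Int) (i : Int) : ∀ (j rx ry : Int) (acc : List (Int × Int)),
    0 ≤ rx → pvLoopRow r i j (rx, ry, acc) = (rx, ry, acc ++ pvCollectRow r i j rx ry) := by
  induction r with
  | nil => intro j rx ry acc h; simp [pvLoopRow, pvCollectRow]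
  | cons x xs ih =>
      intro j rx ry acc h
      by_cases hx : x > 0
      · simp only [pvLoopRow, pvCollectRow, hx, if_pos]
        have hne : ¬ (rx = -1) := by omega
        simp only [hne, reduceIte]
        rw [ih (j + 1) rx ry _ h]
        simp [List.append_assoc]
      · simp only [pvLoopRow, pvCollectRow, hx, reduceIte]
        rw [ih (j + 1) rx ry acc h]
        simp

-- same for the outer loop
theorem pvLoopRows_set (rows : List (List Int)) : ∀ (i rx ry : Int) (acc : List (Int × Int)),
    0 ≤ rx → pvLoopRows rows i (rx, ry, acc) = (rx, ry, acc ++ pvCollectRows rows i rx ry) := by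
  induction rows with
  | nil => intro i rx ry acc h; simp [pvLoopRows, pvCollectRows]
  | cons r rs ih =>
      intro i rx ry acc h
      simp only [pvLoopRows, pvCollectRows]
      rw [pvLoopRow_set r i 0 rx ry acc h, ih (i + 1) rx ry _ h]
      simp [List.append_assoc]

-- a row with no positive pixel contributes nothing to the comprehension
theorem pvCollectRow_none (r : List Int) : ∀ (j j' i rx ry : Int),
    pvFindRow r j = none → pvCollectRow r i j' rx ry = [] := by
  induction r with
  | nil => intro j j' i rx ry _; rfl
  | cons x xs ih =>
      intro j j' i rx ry h
      by_cases hx : x > 0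
      · simp [pvFindRow, hx] at h
      · simp only [pvFindRow, hx, reduceIte] at h
        simp [pvCollectRow, hx, ih (j + 1) (j' + 1) i rx ry h]

-- A's inner loop from the unset state, characterised by pvFindRow
theorem pvLoopRow_unset (r : List Int) (i : Int) (hi : 0 ≤ i) :
    ∀ (j : Int) (acc : List (Int × Int)), 0 ≤ j →
    pvLoopRow r i j (-1, -1, acc) =
      match pvFindRow r j with
      | none => (-1, -1, acc)
      | some jr => (i, jr, acc ++ pvCollectRow r i j i jr) := by
  induction r with
  | nil => intro j acc _; simp [pvLoopRow, pvFindRow]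
  | cons x xs ih =>
      intro j acc hj
      by_cases hx : x > 0
      · simp only [pvLoopRow, pvFindRow, hx, if_pos]
        have : (0 : Int) ≤ i := hi
        rw [pvLoopRow_set xs i (j + 1) i j (acc ++ [(i - i, j - j)]) hi]
        simp [pvCollectRow, hx, List.append_assoc, sub_self]
      · simp only [pvLoopRow, pvFindRow, hx, reduceIte]
        rw [ih (j + 1) acc (by omega)]
        cases hf : pvFindRow xs (j + 1) with
        | none => simp
        | some jr => simp [pvCollectRow, hx]

-- A's outer loop from the unset state, characterised by pvFindRef
theorem pvLoopRows_unset (rows : List (List Int)) : ∀ (i : Int) (acc : List (Int × Int)), 0 ≤ i →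
    pvLoopRows rows i (-1, -1, acc) =
      match pvFindRef rows i with
      | none => (-1, -1, acc)
      | some (rx, ry) => (rx, ry, acc ++ pvCollectRows rows i rx ry) := by
  induction rows with
  | nil => intro i acc _; simp [pvLoopRows, pvFindRef]
  | cons r rs ih =>
      intro i acc hi
      simp only [pvLoopRows, pvFindRef]
      rw [pvLoopRow_unset r i hi 0 acc (by omega)]
      cases hf : pvFindRow r 0 with
      | some j =>
          simp only
          rw [pvLoopRows_set rs (i + 1) i j _ hi]
          simp [pvCollectRows, List.append_assoc]
      | none =>
          simp only
          rw [ih (i + 1) acc (by omega)]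
          cases hg : pvFindRef rs (i + 1) with
          | none => simp
          | some p =>
              obtain ⟨rx, ry⟩ := p
              simp [pvCollectRows, pvCollectRow_none r 0 0 i rx ry hf]

-- ===== VERDICT (by name: the statement is the Claim_ definition above) =====
theorem same_meteroite_spec : Claim_equal_same_meteroite := by
  intro img _
  unfold Spec_same_meteroite same_meteroite same_meteroite_alt
  rw [pvLoopRows_unset img 0 [] le_rfl]
  cases h : pvFindRef img 0 with
  | none => rfl
  | some p => obtain ⟨rx, ry⟩ := p; simp
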